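-- pv_equiv track=rewrite | github.com/hzwuhao8/ccc | 2012/j2.py | my_run
-- ===== SOURCE A (Python) =====
-- def my_run(data):
--     delta_list = []
--     for i in range(len(data) - 1):
--         delta = data[i + 1] - data[i]
--         if delta > 0:
--             delta_list.append(1)
--         elif delta == 0:
--             delta_list.append(0)
--         else:
--             delta_list.append(-1)
--
--     if delta_list == [0, 0, 0]:
--         return "Fish At Constant Depth"
--     elif delta_list == [1, 1, 1]:
--         return "Fish Rising"
--     elif delta_list == [-1, -1, -1]:
--         return "Fish Diving"
--     else:
--         return "No Fish"
-- ===== SOURCE B (Python) =====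
-- def _chain(xs, rel):
--     return all(rel(xs[i], xs[i + 1]) for i in range(len(xs) - 1))
--
-- def my_run(data):
--     if len(data) != 4:
--         return "No Fish"
--     if _chain(data, lambda a, b: a < b):
--         return "Fish Rising"
--     if _chain(data, lambda a, b: a > b):
--         return "Fish Diving"
--     if _chain(data, lambda a, b: a == b):
--         return "Fish At Constant Depth"
--     return "No Fish"
-- ===== Notes on version B (the rewrite author's own statement) =====
-- stated objective: simpler
-- what changed: Drops A's build-a-delta-sign-list-then-pattern-match: B guards length==4 first and classifies by direct monotone consecutive-pair scans (strictly increasing / decreasing / all equal).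
import Mathlib
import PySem

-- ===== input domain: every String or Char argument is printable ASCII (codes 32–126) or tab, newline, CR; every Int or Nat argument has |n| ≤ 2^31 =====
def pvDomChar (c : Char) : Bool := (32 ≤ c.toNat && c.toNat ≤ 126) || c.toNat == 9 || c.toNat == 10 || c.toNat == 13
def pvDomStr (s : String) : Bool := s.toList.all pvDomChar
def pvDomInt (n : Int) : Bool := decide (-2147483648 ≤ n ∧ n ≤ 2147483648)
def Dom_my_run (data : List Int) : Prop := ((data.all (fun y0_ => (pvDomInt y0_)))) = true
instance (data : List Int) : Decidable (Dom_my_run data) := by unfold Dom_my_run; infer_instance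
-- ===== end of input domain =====

-- B replaces A's delta-sign-list construction and pattern match by a length guard plus
-- direct monotone consecutive-pair scans; simpler decomposition, same results.


-- ===== PORT A =====
def my_run (data : List Int) : String :=
  let delta_list : List Int :=
    (PySem.List.pyRange 0 ((data.length : Int) - 1) 1).foldl
      (fun acc i =>
        let delta := PySem.List.pyGetD data (i + 1) 0 - PySem.List.pyGetD data i 0
        if delta > 0 then acc ++ [(1 : Int)]
        else if delta = 0 then acc ++ [(0 : Int)]
        else acc ++ [(-1 : Int)]) []
  if delta_list = [0, 0, 0] then "Fish At Constant Depth"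
  else if delta_list = [1, 1, 1] then "Fish Rising"
  else if delta_list = [-1, -1, -1] then "Fish Diving"
  else "No Fish"

-- ===== PORT B =====
-- all(rel(xs[i], xs[i+1]) for i in range(len(xs)-1)), as a scan over consecutive pairs
def pvChain (rel : Int → Int → Bool) : List Int → Bool
  | a :: b :: rest => rel a b && pvChain rel (b :: rest)
  | _ => true

def my_run_alt (data : List Int) : String :=
  if data.length ≠ 4 then "No Fish"
  else if pvChain (fun a b => a < b) data then "Fish Rising"
  else if pvChain (fun a b => a > b) data then "Fish Diving"
  else if pvChain (fun a b => a == b) data then "Fish At Constant Depth"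
  else "No Fish"

-- ===== PRECONDITION & SPEC =====
def Spec_my_run (data : List Int) (out : String) : Prop := out = my_run_alt data
instance (data : List Int) (out : String) : Decidable (Spec_my_run data out) := by unfold Spec_my_run; infer_instance

-- ===== CLAIM (what is proved, stated in full; the proofs are below) =====
def Claim_equal_my_run : Prop := ∀ (data : List Int), Dom_my_run data → Spec_my_run data (my_run data)

-- ===== LEMMAS AND PROOFS =====

theorem sign_fn_eq (acc : List Int) (d : Int) :
    (if d > 0 then acc ++ [(1 : Int)] else if d = 0 then acc ++ [(0 : Int)] else acc ++ [(-1 : Int)])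
      = acc ++ [if d > 0 then (1 : Int) else if d = 0 then 0 else -1] := by
  split_ifs <;> rfl

theorem my_run_delta_map (data : List Int) :
    my_run data =
      (let delta_list : List Int :=
        (PySem.List.pyRange 0 ((data.length : Int) - 1) 1).map
          (fun i =>
            let d := PySem.List.pyGetD data (i + 1) 0 - PySem.List.pyGetD data i 0
            if d > 0 then (1 : Int) else if d = 0 then 0 else -1)
      if delta_list = [0, 0, 0] then "Fish At Constant Depth"
      else if delta_list = [1, 1, 1] then "Fish Rising"
      else if delta_list = [-1, -1, -1] then "Fish Diving"
      else "No Fish") := by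
  unfold my_run
  simp only [sign_fn_eq]
  rw [PySem.List.foldl_append_singleton_eq_map]
  simp

theorem my_run_long (a b c d e : Int) (rest : List Int) :
    my_run (a :: b :: c :: d :: e :: rest) = "No Fish" := by
  rw [my_run_delta_map]
  have hlen : ((PySem.List.pyRange 0 (((a :: b :: c :: d :: e :: rest).length : Int) - 1) 1).map
      (fun i =>
        let d' := PySem.List.pyGetD (a :: b :: c :: d :: e :: rest) (i + 1) 0 -
          PySem.List.pyGetD (a :: b :: c :: d :: e :: rest) i 0
        if d' > 0 then (1 : Int) else if d' = 0 then 0 else -1)).length = 4 + rest.length := by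
    simp [PySem.List.length_pyRange_one]
    omega
  simp only []
  split_ifs with h1 h2 h3
  · exfalso; rw [h1] at hlen; simp at hlen; omega
  · exfalso; rw [h2] at hlen; simp at hlen; omega
  · exfalso; rw [h3] at hlen; simp at hlen; omega
  · rfl

set_option maxHeartbeats 1000000 in
-- ===== VERDICT (by name: the statement is the Claim_ definition above) =====
theorem my_run_spec : Claim_equal_my_run := by
  intro data _
  unfold Spec_my_run
  match data with
  | [] => decide
  | [a] =>
      rw [my_run_delta_map]
      rw [show ((([a] : List Int).length : Int) - 1) = 0 by simp]
      rw [show PySem.List.pyRange 0 (0 : Int) 1 = [] by decide]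
      simp [my_run_alt]
  | [a, b] =>
      rw [my_run_delta_map]
      rw [show ((([a, b] : List Int).length : Int) - 1) = 1 by simp]
      rw [show PySem.List.pyRange 0 (1 : Int) 1 = [0] by decide]
      simp [my_run_alt, PySem.List.pyGetD_ofNat']
  | [a, b, c] =>
      rw [my_run_delta_map]
      rw [show ((([a, b, c] : List Int).length : Int) - 1) = 2 by simp]
      rw [show PySem.List.pyRange 0 (2 : Int) 1 = [0, 1] by decide]
      simp [my_run_alt, PySem.List.pyGetD_ofNat']
  | [a, b, c, d] =>
      rw [my_run_delta_map]
      rw [show ((([a, b, c, d] : List Int).length : Int) - 1) = 3 by simp]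
      rw [show PySem.List.pyRange 0 (3 : Int) 1 = [0, 1, 2] by decide]
      simp [my_run_alt, pvChain, PySem.List.pyGetD_ofNat']
      split_ifs <;> first | rfl | omega | simp_all
  | a :: b :: c :: d :: e :: rest =>
      rw [my_run_long]
      have hne : (a :: b :: c :: d :: e :: rest).length ≠ 4 := by simp
      unfold my_run_alt
      rw [if_pos hne]
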